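-- pv_equiv track=rewrite | github.com/zhangjw-THU/Coding-Practice | MagicNum.py | solve
-- ===== SOURCE A (Python) =====
-- def solve(n):
--     Num2P = [0,1,5,-1,-1,2,9,-1,8,6]
--     count = 0
--     for i in range(1,n+1):
--         s = str(i)
--         length = len(s)
--         new_num = ''
--         flag = 1
--         for j in range(length):
--             letter = int(s[j])
--             old2new = Num2P[int(letter)]
--             if old2new==-1:
--                 flag = -1
--                 break
--             new_num = new_num + str(old2new)
--         if flag == 1 and int(new_num) != i:
--             count = count+1
--     return count
-- ===== SOURCE B (Python) =====
-- # Faster exact re-implementation: instead of scanning every i in 1..n and string-mapping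
-- # its digits, count arithmetically. A number i>=1 is "magic" iff every digit lies in
-- # S = {0,1,2,5,6,8,9} (the mappable digits) and not every digit lies in T = {0,1,8}
-- # (the digits that map to themselves).  So answer = G(n,S) - G(n,T), where
-- # G(m,D) = #{x in [0..m] : all digits of x in D}, computed by recursion on m // 10.
--
-- def _ok(m, allowed):
--     # all digits of m (m >= 0) lie in `allowed`
--     while m > 0:
--         m, r = divmod(m, 10)
--         if r not in allowed:
--             return False
--     return True
--
--
-- def _g(m, allowed):
--     # number of x in [0..m] whose digits all lie in `allowed` (requires 0 in allowed)
--     if m < 0: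
--         return 0
--     if m < 10:
--         return sum(1 for d in allowed if d <= m)
--     q, r = divmod(m, 10)
--     low = sum(1 for d in allowed if d <= r)
--     return _g(q - 1, allowed) * len(allowed) + (low if _ok(q, allowed) else 0)
--
--
-- def solve(n):
--     S = (0, 1, 2, 5, 6, 8, 9)
--     T = (0, 1, 8)
--     return _g(n, S) - _g(n, T)
-- ===== Notes on version B (the rewrite author's own statement) =====
-- stated objective: faster
-- what changed: Instead of looping over every i in 1..n and mapping the digits of str(i), B counts arithmetically: the answer is G(n,S)-G(n,T) where G(m,D) counts numbers in [0..m] whose digits all lie in D (S = mappable digits, T = self-mapping digits), computed by a digit recursion on m//10.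
import Mathlib
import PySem

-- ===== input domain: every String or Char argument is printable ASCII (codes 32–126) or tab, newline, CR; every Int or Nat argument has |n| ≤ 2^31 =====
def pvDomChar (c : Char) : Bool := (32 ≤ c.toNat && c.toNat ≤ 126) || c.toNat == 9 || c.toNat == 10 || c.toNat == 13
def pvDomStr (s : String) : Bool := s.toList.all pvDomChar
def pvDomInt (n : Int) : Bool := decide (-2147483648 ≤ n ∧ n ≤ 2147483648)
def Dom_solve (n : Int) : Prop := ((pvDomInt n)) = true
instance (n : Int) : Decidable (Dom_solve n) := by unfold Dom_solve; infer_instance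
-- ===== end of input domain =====

-- B replaces A's scan of every i in 1..n (string-mapping the digits of each i) by a
-- digit recursion on n//10 counting the numbers whose digits are all mappable minus
-- those whose digits are all self-mapping: an asymptotically faster exact count.

-- ===== PORT A =====
def aNum2P : List Int := [0, 1, 5, -1, -1, 2, 9, -1, 8, 6]

-- int(s), ported by hand (exact for the nonempty all-ASCII-digit strings it is applied
-- to in A: both int(s[j]) with s = str(i) and int(new_num), new_num a concatenation of
-- str(d) for digits d, are of that shape; int('') / non-digits raise -> none).  The
-- PySem primitive PySem.Int.ofChars? computes the same values there, but its digit
-- accumulator is a private definition proofs cannot unfold.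
def pvInt (cs : List Char) : Option Int :=
  if cs = [] then none
  else cs.foldlM (fun (acc : Int) c =>
    if c.isDigit then some (acc * 10 + ((c.toNat : Int) - 48)) else none) 0

-- the inner 'for j in range(length)' loop of A, with its break (structural recursion
-- over the characters of s; state = (flag, new_num))
def aDigitsLoop : List Char → Int → List Char → Int × List Char
  | [], flag, new_num => (flag, new_num)
  | c :: rest, flag, new_num =>
    let letter := (pvInt [c]).getD 0                 -- int(s[j]); never none: s = str(i), i ≥ 1
    let old2new := PySem.List.pyGetD aNum2P letter 0 -- Num2P[letter]; letter ∈ 0..9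
    if old2new = -1 then (-1, new_num)               -- flag = -1; break
    else aDigitsLoop rest flag (new_num ++ PySem.Int.toChars old2new)  -- new_num += str(old2new)

-- the body of A's 'for i in range(1, n+1)' loop
def aBody (count i : Int) : Int :=
  let s := PySem.Int.toChars i                       -- str(i)
  let res := aDigitsLoop s 1 []
  if res.1 = 1 then
    match pvInt res.2 with                           -- int(new_num)
    | some v => if v ≠ i then count + 1 else count
    | none => count                                  -- unreachable: new_num is nonempty digits when flag = 1
  else count

def solve (n : Int) : Int := (PySem.List.pyRange 1 (n + 1) 1).foldl aBody 0

-- ===== PORT B =====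
def bS : List Int := [0, 1, 2, 5, 6, 8, 9]
def bT : List Int := [0, 1, 8]

-- _ok(m, allowed): all digits of m lie in allowed (B's while loop)
def okDigits (m : Int) (allowed : List Int) : Bool :=
  if _h : 0 < m then
    let q := PySem.Int.floordiv m 10
    let r := PySem.Int.mod m 10
    if r ∈ allowed then okDigits q allowed else false
  else true
termination_by m.toNat
decreasing_by
  rw [PySem.Int.floordiv_eq_ediv_of_pos (by norm_num)]; omega

-- _g(m, allowed): number of x in [0..m] whose digits all lie in allowed
def gcount (m : Int) (allowed : List Int) : Int :=
  if _h : m < 0 then 0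
  else if _h2 : m < 10 then ((allowed.filter (fun d => d ≤ m)).length : Int)
  else
    let q := PySem.Int.floordiv m 10
    let r := PySem.Int.mod m 10
    let low : Int := ((allowed.filter (fun d => d ≤ r)).length : Int)
    gcount (q - 1) allowed * (allowed.length : Int) + (if okDigits q allowed then low else 0)
termination_by m.toNat
decreasing_by
  rw [PySem.Int.floordiv_eq_ediv_of_pos (by norm_num)]; omega

def solve_alt (n : Int) : Int := gcount n bS - gcount n bT

-- ===== PRECONDITION & SPEC =====
def Spec_solve (n : Int) (out : Int) : Prop := out = solve_alt n
instance (n : Int) (out : Int) : Decidable (Spec_solve n out) := by unfold Spec_solve; infer_instance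

-- ===== CLAIM (what is proved, stated in full; the proofs are below) =====
def Claim_equal_solve : Prop := ∀ (n : Int), Dom_solve n → Spec_solve n (solve n)

-- ===== LEMMAS AND PROOFS =====

-- Nat.toDigits (the digits of str(i)): accumulator and fuel bookkeeping
lemma tdcore_acc : ∀ (f n : Nat) (l : List Char),
    Nat.toDigitsCore 10 f n l = Nat.toDigitsCore 10 f n [] ++ l := by
  intro f
  induction f with
  | zero => intro n l; simp [Nat.toDigitsCore]
  | succ f ih =>
    intro n l
    simp only [Nat.toDigitsCore]
    by_cases h : n / 10 = 0
    · simp [h]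
    · simp only [h, if_false]
      rw [ih (n / 10) (Nat.digitChar (n % 10) :: l), ih (n / 10) [Nat.digitChar (n % 10)]]
      simp

lemma tdcore_fuel : ∀ (n f f' : Nat), n < f → n < f' → ∀ l : List Char,
    Nat.toDigitsCore 10 f n l = Nat.toDigitsCore 10 f' n l := by
  intro n
  induction n using Nat.strong_induction_on with
  | _ n IH =>
    intro f f' hf hf' l
    obtain ⟨g, rfl⟩ : ∃ g, f = g + 1 := ⟨f - 1, by omega⟩
    obtain ⟨g', rfl⟩ : ∃ g', f' = g' + 1 := ⟨f' - 1, by omega⟩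
    simp only [Nat.toDigitsCore]
    by_cases h : n / 10 = 0
    · simp [h]
    · simp only [h, if_false]
      have hn : 10 ≤ n := by omega
      have hlt : n / 10 < n := by omega
      exact IH (n / 10) hlt g g' (by omega) (by omega) _

lemma toDigits10_small (n : Nat) (h : n < 10) : Nat.toDigits 10 n = [Nat.digitChar n] := by
  rw [Nat.toDigits]
  simp [Nat.toDigitsCore, Nat.div_eq_of_lt h, Nat.mod_eq_of_lt h]

lemma toDigits10_step (n : Nat) (h : 10 ≤ n) :
    Nat.toDigits 10 n = Nat.toDigits 10 (n / 10) ++ [Nat.digitChar (n % 10)] := by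
  rw [Nat.toDigits]
  simp only [Nat.toDigitsCore]
  have h1 : ¬ n / 10 = 0 := by omega
  simp only [h1, if_false]
  rw [tdcore_acc n (n / 10) [Nat.digitChar (n % 10)]]
  rw [tdcore_fuel (n / 10) n (n / 10 + 1) (by omega) (by omega)]
  rfl

lemma toChars_nonneg (i : Int) (h : 0 ≤ i) : PySem.Int.toChars i = Nat.toDigits 10 i.toNat := by
  unfold PySem.Int.toChars
  rw [if_neg (by omega)]

lemma toChars_small (i : Int) (h0 : 0 ≤ i) (h : i < 10) :
    PySem.Int.toChars i = [Nat.digitChar i.toNat] := by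
  rw [toChars_nonneg i h0, toDigits10_small i.toNat (by omega)]

lemma toChars_step (i : Int) (h : 10 ≤ i) :
    PySem.Int.toChars i = PySem.Int.toChars (i / 10) ++ [Nat.digitChar (i % 10).toNat] := by
  rw [toChars_nonneg i (by omega), toDigits10_step i.toNat (by omega),
    toChars_nonneg (i / 10) (by omega)]
  have h1 : i.toNat / 10 = (i / 10).toNat := by omega
  have h2 : i.toNat % 10 = (i % 10).toNat := by omega
  rw [h1, h2]

lemma toChars_ne_nil (i : Int) (h : 0 ≤ i) : PySem.Int.toChars i ≠ [] := by
  by_cases h10 : i < 10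
  · rw [toChars_small i h h10]; simp
  · rw [toChars_step i (by omega)]; simp

-- parsing a digit string
lemma pvInt_append_digit (cs : List Char) (hne : cs ≠ []) (v : Int) (hv : pvInt cs = some v)
    (d : Nat) (hd : d < 10) : pvInt (cs ++ [Nat.digitChar d]) = some (v * 10 + (d : Int)) := by
  unfold pvInt at hv ⊢
  rw [if_neg hne] at hv
  rw [if_neg (by simp)]
  rw [List.foldlM_append, hv]
  interval_cases d <;> simp [List.foldlM, Nat.digitChar]

lemma pvInt_toChars : ∀ (k : Nat) (i : Int), i.toNat ≤ k → 0 ≤ i →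
    pvInt (PySem.Int.toChars i) = some i := by
  intro k
  induction k with
  | zero =>
    intro i hk h0
    have : i = 0 := by omega
    subst this; decide
  | succ k IH =>
    intro i hk h0
    by_cases h10 : i < 10
    · interval_cases i <;> decide
    · rw [toChars_step i (by omega)]
      have hq0 : (0 : Int) ≤ i / 10 := by omega
      have hq := IH (i / 10) (by omega) hq0
      have happ := pvInt_append_digit _ (toChars_ne_nil (i / 10) hq0) _ hq (i % 10).toNat (by omega)
      rw [happ]
      simp only [Option.some.injEq]
      omega

-- A's inner loop
lemma aLoop_append (xs ys acc : List Char) : aDigitsLoop (xs ++ ys) 1 acc =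
    if (aDigitsLoop xs 1 acc).1 = 1 then aDigitsLoop ys 1 (aDigitsLoop xs 1 acc).2
    else aDigitsLoop xs 1 acc := by
  induction xs generalizing acc with
  | nil => simp [aDigitsLoop]
  | cons c xs ih =>
    simp only [List.cons_append, aDigitsLoop]
    by_cases h : PySem.List.pyGetD aNum2P ((pvInt [c]).getD 0) 0 = -1
    · simp [h]
    · simp only [h, if_false]
      exact ih _

-- the digit map Num2P as a function, and the mapped value of i
def pmap (d : Int) : Int := PySem.List.pyGetD aNum2P d 0

def mval (i : Int) : Int :=
  if h : i < 10 then pmap i else mval (i / 10) * 10 + pmap (i % 10)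
termination_by i.toNat
decreasing_by omega

lemma mval_small (i : Int) (h : i < 10) : mval i = pmap i := by
  rw [mval]; simp [h]

lemma mval_step (i : Int) (h : ¬ i < 10) : mval i = mval (i / 10) * 10 + pmap (i % 10) := by
  rw [mval]; simp [h]

lemma pvInt_digitChar (r : Int) (h0 : 0 ≤ r) (h9 : r < 10) :
    (pvInt [Nat.digitChar r.toNat]).getD 0 = r := by
  interval_cases r <;> decide

lemma pmap_mem_S (r : Int) (h : r ∈ bS) :
    0 ≤ pmap r ∧ pmap r < 10 ∧ pmap r ≠ -1 ∧ (pmap r = r ↔ r ∈ bT) := by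
  fin_cases h <;> decide

lemma pmap_not_S (r : Int) (h0 : 0 ≤ r) (h9 : r < 10) (h : r ∉ bS) : pmap r = -1 := by
  interval_cases r <;> first | decide | (exfalso; exact h (by decide))

lemma aLoop_single (r : Int) (h0 : 0 ≤ r) (h9 : r < 10) (acc : List Char) :
    aDigitsLoop [Nat.digitChar r.toNat] 1 acc =
      if pmap r = -1 then (-1, acc) else (1, acc ++ PySem.Int.toChars (pmap r)) := by
  have hl := pvInt_digitChar r h0 h9
  simp only [aDigitsLoop, hl, pmap]

-- okDigits unfolding
lemma okDigits_nonpos (m : Int) (h : ¬ 0 < m) (D : List Int) : okDigits m D = true := by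
  rw [okDigits]; simp [h]

lemma okDigits_pos (m : Int) (h : 0 < m) (D : List Int) :
    okDigits m D = (decide ((m % 10) ∈ D) && okDigits (m / 10) D) := by
  rw [okDigits]
  simp only [h, dite_true]
  rw [PySem.Int.floordiv_eq_ediv_of_pos (by norm_num), PySem.Int.mod_eq_emod_of_pos (by norm_num)]
  by_cases hm : m % 10 ∈ D <;> simp [hm]

lemma okDigits_small (m : Int) (h0 : 0 ≤ m) (h : m < 10) (D : List Int) (h0D : 0 ∈ D) :
    okDigits m D = decide (m ∈ D) := by
  by_cases h1 : 0 < m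
  · rw [okDigits_pos m h1 D]
    have e1 : m % 10 = m := by omega
    have e2 : m / 10 = 0 := by omega
    rw [e1, e2, okDigits_nonpos 0 (by omega) D]
    simp
  · have : m = 0 := by omega
    subst this
    rw [okDigits_nonpos 0 (by omega) D]
    simp [h0D]

lemma okT_imp_okS : ∀ (k : Nat) (m : Int), m.toNat ≤ k →
    okDigits m bT = true → okDigits m bS = true := by
  intro k
  induction k with
  | zero =>
    intro m hk hT
    exact okDigits_nonpos m (by omega) bS
  | succ k IH =>
    intro m hk hT
    by_cases hm : 0 < m
    · rw [okDigits_pos m hm] at hT ⊢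
      rw [Bool.and_eq_true] at hT ⊢
      refine ⟨?_, IH (m / 10) (by omega) hT.2⟩
      have hsub : bT ⊆ bS := by decide
      exact decide_eq_true (hsub (of_decide_eq_true hT.1))
    · exact okDigits_nonpos m hm bS

-- the per-i characterisation of A's inner loop
lemma main_char : ∀ (k : Nat) (i : Int), i.toNat ≤ k → 1 ≤ i →
    (okDigits i bS = true →
      aDigitsLoop (PySem.Int.toChars i) 1 [] = (1, PySem.Int.toChars (mval i)) ∧
      1 ≤ mval i ∧ (mval i = i ↔ okDigits i bT = true)) ∧
    (okDigits i bS = false → (aDigitsLoop (PySem.Int.toChars i) 1 []).1 ≠ 1) := by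
  intro k
  induction k with
  | zero => intro i hk hi; exact absurd hk (by omega)
  | succ k IH =>
    intro i hk hi
    by_cases h10 : i < 10
    · rw [okDigits_small i (by omega) h10 bS (by decide),
        okDigits_small i (by omega) h10 bT (by decide), mval_small i h10]
      interval_cases i <;> decide
    · have hq1 : (1 : Int) ≤ i / 10 := by omega
      have hr0 : (0 : Int) ≤ i % 10 := by omega
      have hr9 : i % 10 < 10 := by omega
      have hIH := IH (i / 10) (by omega) hq1
      rw [toChars_step i (by omega),
        aLoop_append (PySem.Int.toChars (i / 10)) [Nat.digitChar (i % 10).toNat] [],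
        okDigits_pos i (by omega) bS, okDigits_pos i (by omega) bT]
      constructor
      · intro hok
        rw [Bool.and_eq_true] at hok
        obtain ⟨hres, hm1, hiff⟩ := hIH.1 hok.2
        rw [hres]
        norm_num
        rw [aLoop_single (i % 10) hr0 hr9]
        have hrS : i % 10 ∈ bS := of_decide_eq_true hok.1
        obtain ⟨hp0, hp9, hpn, hpT⟩ := pmap_mem_S _ hrS
        rw [if_neg hpn]
        refine ⟨?_, ?_, ?_⟩
        · rw [mval_step i h10]
          have hge : (10 : Int) ≤ mval (i / 10) * 10 + pmap (i % 10) := by omega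
          rw [toChars_step _ hge]
          have e1 : (mval (i / 10) * 10 + pmap (i % 10)) / 10 = mval (i / 10) := by omega
          have e2 : (mval (i / 10) * 10 + pmap (i % 10)) % 10 = pmap (i % 10) := by omega
          rw [e1, e2, toChars_small (pmap (i % 10)) hp0 hp9]
        · rw [mval_step i h10]; omega
        · rw [mval_step i h10]
          constructor
          · intro he
            exact ⟨hpT.1 (by omega), hiff.1 (by omega)⟩
          · rintro ⟨h1, h2⟩
            have hpr := hpT.2 h1
            have hqe := hiff.2 h2
            omega
      · intro hok
        rcases Bool.and_eq_false_iff.mp hok with hA | hB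
        · by_cases hq : okDigits (i / 10) bS = true
          · obtain ⟨hres, _, _⟩ := hIH.1 hq
            rw [hres]
            norm_num
            rw [aLoop_single (i % 10) hr0 hr9]
            have hrS : i % 10 ∉ bS := of_decide_eq_false hA
            rw [if_pos (pmap_not_S _ hr0 hr9 hrS)]
            norm_num
          · have hqf : okDigits (i / 10) bS = false := by
              revert hq; cases okDigits (i / 10) bS <;> simp
            have h2 := hIH.2 hqf
            rw [if_neg h2]
            exact h2
        · have h2 := hIH.2 hB
          rw [if_neg h2]
          exact h2

-- A's loop body adds exactly the 0/1 indicator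
lemma aBody_eq (i : Int) (hi : 1 ≤ i) (count : Int) :
    aBody count i = count + (if okDigits i bS && !(okDigits i bT) then 1 else 0) := by
  simp only [aBody]
  by_cases hS : okDigits i bS = true
  · obtain ⟨hres, hm1, hiff⟩ := (main_char i.toNat i le_rfl hi).1 hS
    rw [hres]
    norm_num
    rw [pvInt_toChars (mval i).toNat (mval i) le_rfl (by omega)]
    by_cases hT : okDigits i bT = true
    · have : mval i = i := hiff.2 hT
      simp [this, hS, hT]
    · have hTf : okDigits i bT = false := by
        revert hT; cases okDigits i bT <;> simp
      have : mval i ≠ i := fun h => hT (hiff.1 h)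
      simp [this, hS, hTf]
  · have hSf : okDigits i bS = false := by
      revert hS; cases okDigits i bS <;> simp
    have h2 := (main_char i.toNat i le_rfl hi).2 hSf
    rw [if_neg h2]
    simp [hSf]

-- counting helpers for gcount
lemma cnt_neg (D : List Int) (hd : ∀ d ∈ D, 0 ≤ d) (x : Int) (hx : x < 0) :
    D.filter (fun d => d ≤ x) = [] := by
  rw [List.filter_eq_nil_iff]
  intro a ha
  have := hd a ha
  simp only [decide_eq_true_eq]
  omega

lemma cnt_all (D : List Int) (hd : ∀ d ∈ D, d < 10) (x : Int) (hx : 9 ≤ x) :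
    D.filter (fun d => d ≤ x) = D := by
  rw [List.filter_eq_self]
  intro a ha
  have := hd a ha
  simp only [decide_eq_true_eq]
  omega

lemma cnt_split (D : List Int) (hnd : D.Nodup) (x : Int) :
    ((D.filter (fun d => d ≤ x)).length : Int) =
      ((D.filter (fun d => d ≤ x - 1)).length : Int) + (if x ∈ D then 1 else 0) := by
  induction D with
  | nil => simp
  | cons a D ih =>
    rw [List.nodup_cons] at hnd
    have ih' := ih hnd.2
    simp only [List.filter_cons]
    by_cases hax : a = x
    · subst hax
      rw [if_pos (by simp), if_neg (by simp), List.length_cons,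
        if_pos List.mem_cons_self]
      push_cast
      rw [ih', if_neg hnd.1]
      ring
    · have hxm : (x ∈ a :: D) ↔ x ∈ D := by
        constructor
        · intro h
          rcases List.mem_cons.mp h with h | h
          · exact absurd h.symm hax
          · exact h
        · exact List.mem_cons_of_mem a
      by_cases h1 : a ≤ x
      · have h2 : a ≤ x - 1 := by omega
        rw [if_pos (by simpa using h1), if_pos (by simpa using h2)]
        simp only [List.length_cons]
        push_cast
        rw [ih']
        simp only [hxm]
        ring
      · have h2 : ¬ a ≤ x - 1 := by omega
        rw [if_neg (by simpa using h1), if_neg (by simpa using h2), ih']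
        simp only [hxm]

lemma cnt_le_zero (D : List Int) (h0D : 0 ∈ D) (hnd : D.Nodup) (hd : ∀ d ∈ D, 0 ≤ d) :
    ((D.filter (fun d => d ≤ (0 : Int))).length : Int) = 1 := by
  rw [cnt_split D hnd 0, cnt_neg D hd (0 - 1) (by omega)]
  simp [h0D]

lemma gcount_neg (m : Int) (h : m < 0) (D : List Int) : gcount m D = 0 := by
  rw [gcount]; simp [h]

lemma gcount_small (m : Int) (h0 : ¬ m < 0) (h : m < 10) (D : List Int) :
    gcount m D = ((D.filter (fun d => d ≤ m)).length : Int) := by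
  rw [gcount]; simp [h0, h]

lemma gcount_step (m : Int) (h : ¬ m < 10) (D : List Int) :
    gcount m D = gcount (m / 10 - 1) D * (D.length : Int) +
      (if okDigits (m / 10) D then ((D.filter (fun d => d ≤ m % 10)).length : Int) else 0) := by
  rw [gcount]
  rw [dif_neg (by omega), dif_neg h]
  rw [PySem.Int.floordiv_eq_ediv_of_pos (by norm_num), PySem.Int.mod_eq_emod_of_pos (by norm_num)]

-- the key recurrence: gcount counts one more exactly when okDigits holds
lemma gcount_succ (D : List Int) (h0D : 0 ∈ D) (hnd : D.Nodup)
    (hdig : ∀ d ∈ D, 0 ≤ d ∧ d < 10) :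
    ∀ (k : Nat) (m : Int), m.toNat ≤ k → 0 ≤ m →
      gcount m D = gcount (m - 1) D + (if okDigits m D then 1 else 0) := by
  have hd0 : ∀ d ∈ D, 0 ≤ d := fun d hd => (hdig d hd).1
  have hd9 : ∀ d ∈ D, d < 10 := fun d hd => (hdig d hd).2
  have base0 : gcount 0 D = gcount (0 - 1) D + (if okDigits 0 D then 1 else 0) := by
    rw [gcount_small 0 (by omega) (by omega) D, gcount_neg (0 - 1) (by omega) D,
      okDigits_nonpos 0 (by omega) D, cnt_le_zero D h0D hnd hd0]
    simp
  intro k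
  induction k with
  | zero =>
    intro m hk h0
    have : m = 0 := by omega
    subst this
    exact base0
  | succ k IH =>
    intro m hk h0
    by_cases h10 : m < 10
    · by_cases hm0 : m = 0
      · subst hm0; exact base0
      · rw [gcount_small m (by omega) h10 D, gcount_small (m - 1) (by omega) (by omega) D,
          okDigits_small m (by omega) h10 D h0D, cnt_split D hnd m]
        simp
    · have hq1 : (1 : Int) ≤ m / 10 := by omega
      rw [gcount_step m h10 D]
      by_cases hr : 1 ≤ m % 10
      · rw [gcount_step (m - 1) (by omega) D]
        have e1 : (m - 1) / 10 = m / 10 := by omega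
        have e2 : (m - 1) % 10 = m % 10 - 1 := by omega
        rw [e1, e2, okDigits_pos m (by omega) D, cnt_split D hnd (m % 10)]
        by_cases hq : okDigits (m / 10) D = true
        · by_cases hrD : m % 10 ∈ D <;> simp [hq, hrD] <;> ring
        · have hqf : okDigits (m / 10) D = false := by
            revert hq; cases okDigits (m / 10) D <;> simp
          simp [hqf]
      · have hr0' : m % 10 = 0 := by omega
        rw [hr0', okDigits_pos m (by omega) D, hr0']
        by_cases hq1' : m / 10 = 1
        · have hm : m = 10 := by omega
          subst hm
          norm_num
          rw [gcount_small 0 (by omega) (by omega) D, gcount_small 9 (by omega) (by omega) D,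
            okDigits_small 1 (by omega) (by omega) D h0D,
            cnt_le_zero D h0D hnd hd0, cnt_all D hd9 9 (by norm_num)]
          by_cases h1D : (1 : Int) ∈ D <;> simp [h0D, h1D]
        · have hq2 : (2 : Int) ≤ m / 10 := by omega
          rw [gcount_step (m - 1) (by omega) D]
          have e1 : (m - 1) / 10 = m / 10 - 1 := by omega
          have e2 : (m - 1) % 10 = 9 := by omega
          rw [e1, e2, cnt_all D hd9 9 (by norm_num), cnt_le_zero D h0D hnd hd0]
          have hIH := IH (m / 10 - 1) (by omega) (by omega)
          have e3 : m / 10 - 1 - 1 = m / 10 - 2 := by ring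
          rw [e3] at hIH
          have h0D' : decide ((0 : Int) ∈ D) = true := decide_eq_true h0D
          rw [e3, hIH, h0D', Bool.true_and]
          split_ifs <;> ring

lemma solve_base (n : Int) (hle : n ≤ 0) : solve n = solve_alt n := by
  unfold solve solve_alt
  rw [PySem.List.pyRange_one_eq_nil (by omega)]
  simp only [List.foldl_nil]
  by_cases hn : n < 0
  · rw [gcount_neg n hn bS, gcount_neg n hn bT]
    norm_num
  · have : n = 0 := by omega
    subst this
    rw [gcount_small 0 (by omega) (by omega) bS, gcount_small 0 (by omega) (by omega) bT,
      cnt_le_zero bS (by decide) (by decide) (by decide),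
      cnt_le_zero bT (by decide) (by decide) (by decide)]
    norm_num

lemma solve_eq : ∀ (k : Nat) (n : Int), n.toNat ≤ k → solve n = solve_alt n := by
  intro k
  induction k with
  | zero => intro n hk; exact solve_base n (by omega)
  | succ k IH =>
    intro n hk
    by_cases hn : n ≤ 0
    · exact solve_base n hn
    · have hn1 : (1 : Int) ≤ n := by omega
      unfold solve
      rw [PySem.List.pyRange_one_succ_right (by omega), List.foldl_append]
      simp only [List.foldl_cons, List.foldl_nil]
      have hs : (PySem.List.pyRange 1 n 1).foldl aBody 0 = solve (n - 1) := by
        unfold solve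
        norm_num
      rw [hs, aBody_eq n hn1, IH (n - 1) (by omega)]
      unfold solve_alt
      rw [gcount_succ bS (by decide) (by decide) (by decide) n.toNat n le_rfl (by omega),
        gcount_succ bT (by decide) (by decide) (by decide) n.toNat n le_rfl (by omega)]
      have hTS := okT_imp_okS n.toNat n le_rfl
      by_cases hS : okDigits n bS = true <;> by_cases hT : okDigits n bT = true <;>
        simp [hS, hT] at hTS ⊢ <;> ring

-- ===== VERDICT (by name: the statement is the Claim_ definition above) =====
theorem solve_spec : Claim_equal_solve := by
  intro n _
  unfold Spec_solve
  exact solve_eq n.toNat n le_rfl
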